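-- pv_equiv track=rewrite | github.com/TomDakan/engineering-standards | scripts/generate_docs.py | extract_checklists
-- ===== SOURCE A (Python) =====
-- def extract_checklists(languages):
--     """Extracts 'Verification Checklist' sections from language markdown files."""
--     extracted = {}
--     checklist_header = "## Verification Checklist"
--
--     for lang, files in languages.items():
--         extracted[lang] = []
--         for content in files.values():
--             if checklist_header in content:
--                 # Split and take the part after the header
--                 parts = content.split(checklist_header)
--                 if len(parts) > 1:
--                     # Take the section until the next header or end of file
--                     section = parts[1].split("\n#")[0].strip()
--                     extracted[lang].append(section)
--     return extracted
-- ===== SOURCE B (Python) =====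
-- def _scan(content, pats, start):
--     """First index k >= start at which one of pats matches, else None (naive multi-pattern scan)."""
--     for k in range(start, len(content) + 1):
--         for p in pats:
--             if content.startswith(p, k):
--                 return k
--     return None
--
--
-- def _section(content):
--     """The checklist section of one file, or None: scan for the header, then one
--     simultaneous scan for the earliest of the next header / newline-'#' stop mark."""
--     header = "## Verification Checklist"
--     i = _scan(content, [header], 0)
--     if i is None:
--         return None
--     start = i + len(header)
--     end = _scan(content, [header, "\n#"], start)
--     return content[start:end].strip()
--
--
-- def extract_checklists(languages):
--     """Extracts 'Verification Checklist' sections from language markdown files."""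
--     return {lang: [s for content in files.values() if (s := _section(content)) is not None]
--             for lang, files in languages.items()}
-- ===== Notes on version B (the rewrite author's own statement) =====
-- stated objective: alternative
-- what changed: Instead of materialising content.split(header) and split('\n#') lists and indexing into them, B runs an explicit index-scanning automaton: a naive multi-pattern scan (_scan) finds the first header position, then one simultaneous forward scan finds the earliest of the next header / '\n#' stop mark, and the section is a single slice content[start:end].strip().
import Mathlib
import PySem

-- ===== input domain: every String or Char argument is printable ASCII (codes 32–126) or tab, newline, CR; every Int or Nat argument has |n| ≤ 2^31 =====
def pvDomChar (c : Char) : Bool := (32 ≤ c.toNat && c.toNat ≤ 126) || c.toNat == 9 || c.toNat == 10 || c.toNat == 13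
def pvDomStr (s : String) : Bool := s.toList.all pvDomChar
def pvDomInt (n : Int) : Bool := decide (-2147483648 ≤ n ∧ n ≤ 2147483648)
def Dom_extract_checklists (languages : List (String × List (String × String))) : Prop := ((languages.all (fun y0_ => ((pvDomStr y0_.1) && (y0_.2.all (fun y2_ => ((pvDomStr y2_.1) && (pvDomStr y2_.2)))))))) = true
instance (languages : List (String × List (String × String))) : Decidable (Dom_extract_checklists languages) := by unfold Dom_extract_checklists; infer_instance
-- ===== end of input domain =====

-- B replaces A's staged str.split calls by an explicit index-scanning automaton: a naive
-- multi-pattern scan locates the header and then, in ONE simultaneous forward scan, the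
-- earliest of the next header / "\n#" stop mark; the section is a single slice, stripped.
-- Equivalence of the return values is proved on association lists with unique keys
-- (the faithful representation of the Python dicts).

-- ===== PORT A =====
def extract_checklists (languages : List (String × List (String × String))) : List (String × List String) :=
  let checklist_header := "## Verification Checklist"
  (languages.foldl (fun (extracted : PySem.Dict String (List String)) lf =>
      let extracted := extracted.insert lf.1 []
      lf.2.foldl (fun extracted kv =>
        if PySem.Str.isIn checklist_header kv.2 then
          -- header is non-empty, so content.split(header) never raises: split? is some
          let parts := (PySem.Str.split? kv.2 checklist_header).getD []
          if 1 < parts.length then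
            -- parts[1] is guarded by the length test, so pyGet? is some;
            -- split never returns an empty list, so [0] is the head
            let sec := PySem.Str.strip (((PySem.Str.split? ((PySem.List.pyGet? parts 1).getD "") "\n#").getD []).headD "")
            -- extracted[lang].append(section): the key lf.1 is always present here
            extracted.modify lf.1 [] (fun xs => xs ++ [sec])
          else extracted
        else extracted) extracted)
    PySem.Dict.empty).items

-- ===== PORT B =====
-- _scan's `for k in range(start, len(content)+1)` loop: first index k ≥ start at which one of
-- pats matches (content.startswith(p, k) for k ≤ len(content) is exactly p.isPrefixOf (drop k))
def pvScanGo (content : List Char) (pats : List (List Char)) : Nat → Nat → Option Nat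
  | _, 0 => none
  | k, fuel+1 =>
    if pats.any (fun p => p.isPrefixOf (content.drop k)) then some k
    else pvScanGo content pats (k+1) fuel

def pvScan (content : List Char) (pats : List (List Char)) (start : Nat) : Option Nat :=
  pvScanGo content pats start (content.length + 1 - start)

-- _section: locate the header, then one simultaneous scan for the next header or "\n#";
-- content[start:end] with end = None / an int becomes the two slice forms below
def pvSection (content : String) : Option String :=
  match pvScan content.toList ["## Verification Checklist".toList] 0 with
  | none => none
  | some i =>
    let start := i + "## Verification Checklist".toList.length
    match pvScan content.toList ["## Verification Checklist".toList, "\n#".toList] start with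
    | none => some (PySem.Str.strip (PySem.Str.slice content (some (start : Int)) none))
    | some e => some (PySem.Str.strip (PySem.Str.slice content (some (start : Int)) (some (e : Int))))

def extract_checklists_alt (languages : List (String × List (String × String))) : List (String × List String) :=
  languages.map (fun lf => (lf.1, lf.2.filterMap (fun kv => pvSection kv.2)))

-- ===== PRECONDITION & SPEC =====
-- Pre_ excludes association lists with duplicate keys (outer language names or file names
-- within one language): such lists do not faithfully represent the Python dicts, whose
-- construction silently overwrites duplicates (a Python dict argument never has them).
def Pre_extract_checklists (languages : List (String × List (String × String))) : Prop :=
  (languages.map Prod.fst).Nodup ∧ ∀ lf ∈ languages, (lf.2.map Prod.fst).Nodup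
instance (languages : List (String × List (String × String))) : Decidable (Pre_extract_checklists languages) := by unfold Pre_extract_checklists; infer_instance

def pvWitness_extract_checklists : (List (String × List (String × String))) :=
  [("python", [("python.md", "## Verification Checklist\n- [ ] tested\n## Next"), ("other.md", "no header")])]

def Spec_extract_checklists (languages : List (String × List (String × String))) (out : List (String × List String)) : Prop := out = extract_checklists_alt languages
instance (languages : List (String × List (String × String))) (out : List (String × List String)) : Decidable (Spec_extract_checklists languages out) := by unfold Spec_extract_checklists; infer_instance

-- ===== CLAIM (what is proved, stated in full; the proofs are below) =====
def Claim_equal_extract_checklists : Prop := ∀ (languages : List (String × List (String × String))), Dom_extract_checklists languages → Pre_extract_checklists languages → Spec_extract_checklists languages (extract_checklists languages)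

-- ===== LEMMAS AND PROOFS =====

-- apply f to the head of a list (if any); models splitOn.go's open current piece
def pvMapHead (f : List Char → List Char) : List (List Char) → List (List Char)
  | [] => []
  | x :: xs => f x :: xs

-- structural specification of Python's s.split(sep) for non-empty sep
def pvCut (sep : List Char) (l : List Char) : List (List Char) :=
  match l with
  | [] => [[]]
  | c :: rest =>
    if h : sep ≠ [] ∧ sep.isPrefixOf (c :: rest) then
      [] :: pvCut sep ((c :: rest).drop sep.length)
    else
      pvMapHead (fun x => c :: x) (pvCut sep rest)
termination_by l.length
decreasing_by
  · simp only [List.length_drop, List.length_cons]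
    have : 0 < sep.length := List.length_pos_of_ne_nil h.1
    omega
  · simp

theorem pvCut_ne_nil (sep l : List Char) : pvCut sep l ≠ [] := by
  fun_induction pvCut sep l with
  | case1 => simp
  | case2 => simp
  | case3 c rest h ih =>
    cases hq : pvCut sep rest with
    | nil => exact absurd hq ih
    | cons a as => simp [pvMapHead]

theorem pvMapHead_cons (f : List Char → List Char) (x : List Char) (xs : List (List Char)) :
    pvMapHead f (x :: xs) = f x :: xs := rfl

theorem pvGo_spec (sep : List Char) (hsep : sep ≠ []) :
    ∀ fuel l cur acc, l.length < fuel →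
      PySem.Chars.splitOn.go sep fuel l cur acc =
        acc.reverse ++ pvMapHead (fun x => cur.reverse ++ x) (pvCut sep l) := by
  intro fuel
  induction fuel with
  | zero => intro l cur acc h; omega
  | succ fuel ih =>
    intro l cur acc h
    match l with
    | [] =>
      rw [PySem.Chars.splitOn.go.eq_def]
      simp [pvCut, pvMapHead_cons]
    | c :: rest =>
      rw [PySem.Chars.splitOn.go.eq_def]
      by_cases hp : sep.isPrefixOf (c :: rest)
      · have hlen : 0 < sep.length := List.length_pos_of_ne_nil hsep
        simp only [hp, if_true]
        rw [ih ((c :: rest).drop sep.length) [] (cur.reverse :: acc)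
          (by simp only [List.length_drop, List.length_cons] at *; omega)]
        rw [pvCut]
        rw [dif_pos ⟨hsep, hp⟩]
        obtain ⟨q, qs, hq⟩ : ∃ q qs, pvCut sep ((c :: rest).drop sep.length) = q :: qs := by
          cases hQ : pvCut sep ((c :: rest).drop sep.length) with
          | nil => exact absurd hQ (pvCut_ne_nil _ _)
          | cons q qs => exact ⟨q, qs, rfl⟩
        simp [hq, pvMapHead_cons]
      · simp only [hp, if_false]
        rw [ih rest (c :: cur) acc (by simp at h ⊢; omega)]
        rw [pvCut]
        rw [dif_neg (by simp [hp])]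
        obtain ⟨q, qs, hq⟩ : ∃ q qs, pvCut sep rest = q :: qs := by
          cases hQ : pvCut sep rest with
          | nil => exact absurd hQ (pvCut_ne_nil _ _)
          | cons q qs => exact ⟨q, qs, rfl⟩
        simp [hq, pvMapHead_cons]

theorem pvSplitOn_eq (sep l : List Char) (hsep : sep ≠ []) :
    PySem.Chars.splitOn l sep = pvCut sep l := by
  rw [PySem.Chars.splitOn, pvGo_spec sep hsep (l.length + 1) l [] [] (by omega)]
  obtain ⟨q, qs, hq⟩ : ∃ q qs, pvCut sep l = q :: qs := by
    cases hQ : pvCut sep l with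
    | nil => exact absurd hQ (pvCut_ne_nil _ _)
    | cons q qs => exact ⟨q, qs, rfl⟩
  simp [hq, pvMapHead_cons]

theorem pvFind_of_prefix {sep l : List Char} (h : sep <+: l) : PySem.Chars.find l sep = 0 := by
  have h0 : 0 ≤ PySem.Chars.find l sep := (PySem.Chars.find_nonneg_iff l sep).mpr h.isInfix
  obtain ⟨_, hmin⟩ := PySem.Chars.find_spec h0
  have : ¬ 0 < (PySem.Chars.find l sep).toNat := fun hlt => hmin 0 hlt (by simpa using h)
  omega

theorem pvFind_cons_of_not_prefix {sep : List Char} (c : Char) {rest : List Char}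
    (h : ¬ sep <+: (c :: rest)) :
    PySem.Chars.find (c :: rest) sep =
      if PySem.Chars.find rest sep = -1 then -1 else PySem.Chars.find rest sep + 1 := by
  by_cases hin : sep <:+: rest
  · have hj : 0 ≤ PySem.Chars.find rest sep := (PySem.Chars.find_nonneg_iff rest sep).mpr hin
    obtain ⟨hjpre, hjmin⟩ := PySem.Chars.find_spec hj
    have hm : 0 ≤ PySem.Chars.find (c :: rest) sep :=
      (PySem.Chars.find_nonneg_iff _ sep).mpr ((List.infix_cons_iff).mpr (Or.inr hin))
    obtain ⟨hmpre, hmmin⟩ := PySem.Chars.find_spec hm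
    set m := (PySem.Chars.find (c :: rest) sep).toNat with hmdef
    set j := (PySem.Chars.find rest sep).toNat with hjdef
    have hm0 : m ≠ 0 := by
      intro h0
      exact h (by simpa [h0] using hmpre)
    have hub : m ≤ j + 1 := by
      by_contra hgt
      exact hmmin (j + 1) (by omega) (by simpa [List.drop_succ_cons] using hjpre)
    have hlb : j + 1 ≤ m := by
      by_contra hgt
      obtain ⟨m', hm'⟩ : ∃ m', m = m' + 1 := ⟨m - 1, by omega⟩
      exact hjmin m' (by omega) (by rw [hm'] at hmpre; simpa [List.drop_succ_cons] using hmpre)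
    have : m = j + 1 := by omega
    rw [if_neg (by omega)]
    omega
  · have h1 : PySem.Chars.find rest sep = -1 := (PySem.Chars.find_eq_neg_one_iff rest sep).mpr hin
    rw [if_pos h1]
    exact (PySem.Chars.find_eq_neg_one_iff _ sep).mpr (by
      intro hcon
      rcases (List.infix_cons_iff).mp hcon with hp | hi
      · exact h hp
      · exact hin hi)

theorem pvCut_eq_find {sep : List Char} (hsep : sep ≠ []) (l : List Char) :
    pvCut sep l =
      if PySem.Chars.find l sep < 0 then [l]
      else l.take (PySem.Chars.find l sep).toNat ::
        pvCut sep (l.drop ((PySem.Chars.find l sep).toNat + sep.length)) := by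
  fun_induction pvCut sep l with
  | case1 =>
    have hf : PySem.Chars.find [] sep = -1 :=
      (PySem.Chars.find_eq_neg_one_iff [] sep).mpr (by simp [List.infix_nil, hsep])
    rw [hf]
    simp
  | case2 c rest h ih =>
    have h0 : PySem.Chars.find (c :: rest) sep = 0 :=
      pvFind_of_prefix (List.isPrefixOf_iff_prefix.mp h.2)
    rw [h0]
    simp
  | case3 c rest h ih =>
    have hnp : ¬ sep <+: (c :: rest) := by
      intro hpre
      exact h ⟨hsep, List.isPrefixOf_iff_prefix.mpr hpre⟩
    rw [pvFind_cons_of_not_prefix c hnp]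
    by_cases h1 : PySem.Chars.find rest sep = -1
    · rw [ih, if_pos (by omega), if_pos (by rw [h1]; omega)]
      simp [pvMapHead_cons]
    · have hj : 0 ≤ PySem.Chars.find rest sep := by
        have := PySem.Chars.neg_one_le_find rest sep
        omega
      rw [ih, if_neg (by omega), if_neg (by rw [if_neg h1]; omega), if_neg h1]
      rw [pvMapHead_cons]
      have ht : (PySem.Chars.find rest sep + 1).toNat = (PySem.Chars.find rest sep).toNat + 1 := by
        omega
      rw [ht, List.take_succ_cons]
      have ht2 : (PySem.Chars.find rest sep).toNat + 1 + sep.length =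
          ((PySem.Chars.find rest sep).toNat + sep.length) + 1 := by omega
      rw [ht2, List.drop_succ_cons]

-- find l p = n when p matches at n and at no earlier position
theorem pvFind_eq_of (l p : List Char) (n : Nat) (hp : p <+: l.drop n)
    (hmin : ∀ i < n, ¬ p <+: l.drop i) : PySem.Chars.find l p = n := by
  have hin : PySem.Chars.isIn p l = true :=
    (PySem.Chars.exists_prefix_drop_iff_isIn p l).mp ⟨n, hp⟩
  have h0 : 0 ≤ PySem.Chars.find l p :=
    (PySem.Chars.find_nonneg_iff l p).mpr ((PySem.Chars.isIn_iff_infix p l).mp hin)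
  obtain ⟨hpre, hm⟩ := PySem.Chars.find_spec h0
  have h1 : ¬ (PySem.Chars.find l p).toNat < n := fun hlt => hmin _ hlt hpre
  have h2 : ¬ n < (PySem.Chars.find l p).toNat := fun hlt => hm n hlt hp
  omega

-- the scanning loop finds nothing when no pattern matches at or after its start
theorem pvScanGo_none (c : List Char) (pats : List (List Char)) :
    ∀ fuel k, (∀ j, k ≤ j → pats.any (fun p => p.isPrefixOf (c.drop j)) = false) →
      pvScanGo c pats k fuel = none := by
  intro fuel
  induction fuel with
  | zero => intro k _; rfl
  | succ fuel ih =>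
    intro k h
    rw [pvScanGo, h k (le_refl k), if_neg (by simp)]
    exact ih (k + 1) (fun j hj => h j (by omega))

-- the scanning loop returns the first matching position at or after its start
theorem pvScanGo_some (c : List Char) (pats : List (List Char)) (m : Nat)
    (hm : pats.any (fun p => p.isPrefixOf (c.drop m)) = true) :
    ∀ fuel k, (∀ i, k ≤ i → i < m → pats.any (fun p => p.isPrefixOf (c.drop i)) = false) →
      k ≤ m → m < k + fuel → pvScanGo c pats k fuel = some m := by
  intro fuel
  induction fuel with
  | zero => intro k _ _ h2; omega
  | succ fuel ih =>
    intro k hmin h1 h2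
    rw [pvScanGo]
    by_cases hk : k = m
    · rw [hk, hm, if_pos rfl]
    · rw [hmin k (le_refl k) (by omega), if_neg (by simp)]
      exact ih (k + 1) (fun i hi => hmin i (by omega)) (by omega) (by omega)

-- Python's whitespace test holds for '\n'
theorem pvIsspace_newline : PySem.Chars.isspace '\n' = true := by decide

-- stripping ignores a trailing newline
theorem pvStrip_snoc_newline (x : List Char) :
    PySem.Chars.strip (x ++ ['\n']) = PySem.Chars.strip x := by
  simp only [PySem.Chars.strip, PySem.Chars.lstrip, PySem.Chars.rstrip]
  rw [List.dropWhile_append]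
  by_cases he : (List.dropWhile PySem.Chars.isspace x).isEmpty
  · rw [if_pos he]
    rw [List.isEmpty_iff] at he
    rw [he]
    simp [pvIsspace_newline]
  · rw [if_neg he]
    rw [List.reverse_append]
    simp [pvIsspace_newline]

-- one truncation step: cut l at find-result f (keep everything when f < 0)
def pvCut1 (l : List Char) (f : Int) : List Char := if f < 0 then l else l.take f.toNat

theorem pvCut1_neg {l : List Char} {f : Int} (h : f < 0) : pvCut1 l f = l := if_pos h

theorem pvCut1_nonneg {l : List Char} {f : Int} (h : 0 ≤ f) :
    pvCut1 l f = l.take f.toNat := if_neg (by omega)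

-- A's sequential two-stage cut of the text after the header
def pvSeqCut (rest : List Char) : List Char :=
  pvCut1 (pvCut1 rest (PySem.Chars.find rest "## Verification Checklist".toList))
    (PySem.Chars.find (pvCut1 rest (PySem.Chars.find rest "## Verification Checklist".toList)) "\n#".toList)

-- B's single cut position: the earliest match of either stop pattern
def pvStopPos (rest : List Char) : Nat :=
  let fH := PySem.Chars.find rest "## Verification Checklist".toList
  let fN := PySem.Chars.find rest "\n#".toList
  if fH = -1 then fN.toNat else if fN = -1 then fH.toNat else min fH.toNat fN.toNat

def pvMinCut (rest : List Char) : List Char :=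
  if PySem.Chars.find rest "## Verification Checklist".toList = -1 ∧
     PySem.Chars.find rest "\n#".toList = -1 then rest
  else rest.take (pvStopPos rest)

-- the two cuts agree up to stripping
theorem pvStrip_seq_min (rest : List Char) :
    PySem.Chars.strip (pvSeqCut rest) = PySem.Chars.strip (pvMinCut rest) := by
  set HL := "## Verification Checklist".toList with hHL
  set NL := "\n#".toList with hNL
  have hNL2 : NL.length = 2 := by rw [hNL]; decide
  have hH1 : -1 ≤ PySem.Chars.find rest HL := PySem.Chars.neg_one_le_find rest HL
  have hN1 : -1 ≤ PySem.Chars.find rest NL := PySem.Chars.neg_one_le_find rest NL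
  have hHlen : PySem.Chars.find rest HL ≤ rest.length := PySem.Chars.find_le_length rest HL
  have hNlen : PySem.Chars.find rest NL ≤ rest.length := PySem.Chars.find_le_length rest NL
  have hlift : ∀ (p : List Char) (n i : Nat), p <+: (rest.take n).drop i → p <+: rest.drop i := by
    intro p n i hp
    rw [List.drop_take] at hp
    exact ((List.prefix_take_iff).mp hp).1
  have hNLocc : ∀ i, NL <+: rest.drop i →
      PySem.Chars.find rest NL ≠ -1 ∧ (PySem.Chars.find rest NL).toNat ≤ i := by
    intro i hp
    have hin : PySem.Chars.isIn NL rest = true :=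
      (PySem.Chars.exists_prefix_drop_iff_isIn NL rest).mp ⟨i, hp⟩
    have h0 : 0 ≤ PySem.Chars.find rest NL := (PySem.Chars.find_nonneg_iff rest NL).mpr
      ((PySem.Chars.isIn_iff_infix NL rest).mp hin)
    obtain ⟨_, hmin⟩ := PySem.Chars.find_spec (s := rest) (sub := NL) h0
    refine ⟨by omega, ?_⟩
    by_contra hlt
    exact hmin i (by omega) hp
  by_cases hHneg : PySem.Chars.find rest HL = -1
  · have hr2 : pvCut1 rest (PySem.Chars.find rest HL) = rest := pvCut1_neg (by omega)
    have hseq : pvSeqCut rest = pvCut1 rest (PySem.Chars.find rest NL) := by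
      rw [pvSeqCut, ← hHL, ← hNL, hr2]
    by_cases hNneg : PySem.Chars.find rest NL = -1
    · have hmin : pvMinCut rest = rest := by
        rw [pvMinCut, ← hHL, ← hNL, if_pos ⟨hHneg, hNneg⟩]
      rw [hseq, hmin, pvCut1_neg (by omega)]
    · have hstop : pvStopPos rest = (PySem.Chars.find rest NL).toNat := by
        rw [pvStopPos, ← hHL, ← hNL]
        simp only [if_pos hHneg]
      have hmin : pvMinCut rest = rest.take (PySem.Chars.find rest NL).toNat := by
        rw [pvMinCut, ← hHL, ← hNL, if_neg (fun hc => hNneg hc.2), hstop]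
      rw [hseq, hmin, pvCut1_nonneg (by omega)]
  · obtain ⟨hHpre, hHmin⟩ := PySem.Chars.find_spec (s := rest) (sub := HL) (by omega)
    have hr2 : pvCut1 rest (PySem.Chars.find rest HL) =
        rest.take (PySem.Chars.find rest HL).toNat := pvCut1_nonneg (by omega)
    set h := (PySem.Chars.find rest HL).toNat with hh
    by_cases hNneg : PySem.Chars.find rest NL = -1
    · -- no "\n#" in rest at all, hence none in rest.take h either
      have hfr2 : PySem.Chars.find (rest.take h) NL = -1 := by
        rw [PySem.Chars.find_eq_neg_one_iff]
        intro hin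
        obtain ⟨j, hj⟩ := (PySem.Chars.exists_prefix_drop_iff_isIn NL (rest.take h)).mpr
          ((PySem.Chars.isIn_iff_infix NL (rest.take h)).mpr hin)
        exact absurd hNneg (hNLocc j (hlift NL h j hj)).1.elim
      have hseq : pvSeqCut rest = rest.take h := by
        rw [pvSeqCut, ← hHL, ← hNL, hr2, hfr2, pvCut1_neg (by omega)]
      have hstop : pvStopPos rest = h := by
        rw [pvStopPos, ← hHL, ← hNL]
        simp only [if_neg hHneg, if_pos hNneg]
        omega
      have hmin : pvMinCut rest = rest.take h := by
        rw [pvMinCut, ← hHL, ← hNL, if_neg (fun hc => hHneg hc.1), hstop]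
      rw [hseq, hmin]
    · obtain ⟨hNpre, hNmin⟩ := PySem.Chars.find_spec (s := rest) (sub := NL) (by omega)
      set n := (PySem.Chars.find rest NL).toNat with hn
      by_cases hcase : h ≤ n
      · -- header cut comes first (or ties): no complete "\n#" survives in rest.take h
        have hfr2 : PySem.Chars.find (rest.take h) NL = -1 := by
          rw [PySem.Chars.find_eq_neg_one_iff]
          intro hin
          obtain ⟨j, hj⟩ := (PySem.Chars.exists_prefix_drop_iff_isIn NL (rest.take h)).mpr
            ((PySem.Chars.isIn_iff_infix NL (rest.take h)).mpr hin)
          have hjn : n ≤ j := (hNLocc j (hlift NL h j hj)).2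
          have hfit : NL.length ≤ ((rest.take h).drop j).length := hj.length_le
          simp only [List.length_drop, List.length_take] at hfit
          omega
        have hseq : pvSeqCut rest = rest.take h := by
          rw [pvSeqCut, ← hHL, ← hNL, hr2, hfr2, pvCut1_neg (by omega)]
        have hstop : pvStopPos rest = h := by
          rw [pvStopPos, ← hHL, ← hNL]
          simp only [if_neg hHneg, if_neg hNneg]
          omega
        have hmin : pvMinCut rest = rest.take h := by
          rw [pvMinCut, ← hHL, ← hNL, if_neg (fun hc => hHneg hc.1), hstop]
        rw [hseq, hmin]
      · by_cases hfit : n + 2 ≤ h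
        · -- complete "\n#" occurrence inside the truncation: sequential find lands on n too
          have hfr2 : PySem.Chars.find (rest.take h) NL = n := by
            apply pvFind_eq_of
            · rw [List.drop_take, List.prefix_take_iff]
              exact ⟨hNpre, by omega⟩
            · intro i hi hp
              exact hNmin i hi (hlift NL h i hp)
          have hseq : pvSeqCut rest = rest.take n := by
            rw [pvSeqCut, ← hHL, ← hNL, hr2, hfr2, pvCut1_nonneg (by omega)]
            rw [List.take_take]
            congr 1
            omega
          have hstop : pvStopPos rest = n := by
            rw [pvStopPos, ← hHL, ← hNL]
            simp only [if_neg hHneg, if_neg hNneg]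
            omega
          have hmin : pvMinCut rest = rest.take n := by
            rw [pvMinCut, ← hHL, ← hNL, if_neg (fun hc => hHneg hc.1), hstop]
          rw [hseq, hmin]
        · -- n = h - 1: the '\n' is the last kept character; stripping removes it
          have hfr2 : PySem.Chars.find (rest.take h) NL = -1 := by
            rw [PySem.Chars.find_eq_neg_one_iff]
            intro hin
            obtain ⟨j, hj⟩ := (PySem.Chars.exists_prefix_drop_iff_isIn NL (rest.take h)).mpr
              ((PySem.Chars.isIn_iff_infix NL (rest.take h)).mpr hin)
            have hjn : n ≤ j := (hNLocc j (hlift NL h j hj)).2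
            have hfit2 : NL.length ≤ ((rest.take h).drop j).length := hj.length_le
            simp only [List.length_drop, List.length_take] at hfit2
            omega
          have hnlt : n < rest.length := by
            have := hNpre.length_le
            simp only [List.length_drop] at this
            omega
          have hgetn : rest[n] = '\n' := by
            have h0 := List.IsPrefix.getElem hNpre (i := 0) (by rw [hNL]; decide)
            simp only [List.getElem_drop, Nat.add_zero] at h0
            rw [← h0]
            rfl
          have htake : rest.take h = rest.take n ++ ['\n'] := by
            have hhn : h = n + 1 := by omega
            rw [hhn, List.take_succ]
            simp [hnlt, hgetn]
          have hseq : pvSeqCut rest = rest.take h := by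
            rw [pvSeqCut, ← hHL, ← hNL, hr2, hfr2, pvCut1_neg (by omega)]
          have hstop : pvStopPos rest = n := by
            rw [pvStopPos, ← hHL, ← hNL]
            simp only [if_neg hHneg, if_neg hNneg]
            omega
          have hmin : pvMinCut rest = rest.take n := by
            rw [pvMinCut, ← hHL, ← hNL, if_neg (fun hc => hHneg hc.1), hstop]
          rw [hseq, hmin, htake, pvStrip_snoc_newline]

-- when the header does not occur, B finds nothing
theorem pvSection_none (c : String)
    (h : PySem.Str.isIn "## Verification Checklist" c = false) :
    pvSection c = none := by
  have hno : ∀ j, ¬ ("## Verification Checklist".toList <+: c.toList.drop j) := by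
    intro j hj
    have hin : PySem.Chars.isIn "## Verification Checklist".toList c.toList = true :=
      (PySem.Chars.exists_prefix_drop_iff_isIn _ _).mp ⟨j, hj⟩
    rw [PySem.Str.isIn_eq, hin] at h
    exact absurd h (by simp)
  have hgo : pvScan c.toList ["## Verification Checklist".toList] 0 = none := by
    apply pvScanGo_none
    intro j _
    simp only [List.any_cons, List.any_nil, Bool.or_false]
    rw [← Bool.not_eq_true]
    intro hb
    exact hno j (List.isPrefixOf_iff_prefix.mp hb)
  rw [pvSection.eq_def, hgo]

-- when the header occurs, B returns exactly A's split-chain value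
theorem pvSection_some (c : String)
    (h : PySem.Str.isIn "## Verification Checklist" c = true) :
    (1 < ((PySem.Str.split? c "## Verification Checklist").getD []).length) ∧
    pvSection c = some (PySem.Str.strip
      (((PySem.Str.split? ((PySem.List.pyGet? ((PySem.Str.split? c "## Verification Checklist").getD []) 1).getD "") "\n#").getD []).headD "")) := by
  have hH : ("## Verification Checklist".toList : List Char) ≠ [] := by decide
  have hN : ("\n#".toList : List Char) ≠ [] := by decide
  set cl := c.toList with hcl
  set HL := "## Verification Checklist".toList with hHL
  set NL := "\n#".toList with hNL
  have hi : 0 ≤ PySem.Chars.find cl HL := by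
    rw [PySem.Str.isIn_eq] at h
    exact (PySem.Chars.find_nonneg_iff _ _).mpr ((PySem.Chars.isIn_iff_infix _ _).mp h)
  obtain ⟨hipre, himin⟩ := PySem.Chars.find_spec (s := cl) (sub := HL) hi
  set i := (PySem.Chars.find cl HL).toNat with hidef
  set rest := cl.drop (i + HL.length) with hrest
  set r2 := if PySem.Chars.find rest HL < 0 then rest
            else rest.take (PySem.Chars.find rest HL).toNat with hr2
  set r3 := if PySem.Chars.find r2 NL < 0 then r2
            else r2.take (PySem.Chars.find r2 NL).toNat with hr3
  -- split on the header: take i :: r2 :: tail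
  obtain ⟨tl, hsplit⟩ : ∃ tl, PySem.Chars.splitOn cl HL = cl.take i :: r2 :: tl := by
    rw [pvSplitOn_eq HL cl hH, pvCut_eq_find hH, if_neg (by omega)]
    by_cases hb : PySem.Chars.find rest HL < 0
    · rw [pvCut_eq_find hH rest, if_pos hb]
      exact ⟨[], by rw [hr2, if_pos hb]⟩
    · rw [pvCut_eq_find hH rest, if_neg hb]
      exact ⟨_, by rw [hr2, if_neg hb]⟩
  obtain ⟨parts, hparts, hpmap⟩ : ∃ parts, PySem.Str.split? c "## Verification Checklist" = some parts ∧
      parts.map String.toList = PySem.Chars.splitOn cl HL := by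
    have hb := PySem.Str.split?_map c "## Verification Checklist"
    rw [PySem.Chars.split?, if_neg (by simpa using hH)] at hb
    cases hsp : PySem.Str.split? c "## Verification Checklist" with
    | none => rw [hsp] at hb; exact absurd hb (by simp)
    | some parts => rw [hsp] at hb; exact ⟨parts, rfl, by simpa using hb⟩
  obtain ⟨s0, s1, ps, hps, hs1⟩ : ∃ s0 s1 ps, parts = s0 :: s1 :: ps ∧ s1.toList = r2 := by
    rw [hsplit] at hpmap
    cases parts with
    | nil => exact absurd hpmap (by simp)
    | cons s0 ps' =>
      cases ps' with
      | nil => exact absurd hpmap (by simp)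
      | cons s1 ps =>
        simp only [List.map_cons, List.cons.injEq] at hpmap
        exact ⟨s0, s1, ps, rfl, hpmap.2.1⟩
  obtain ⟨tl2, hsplit2⟩ : ∃ tl2, PySem.Chars.splitOn r2 NL = r3 :: tl2 := by
    rw [pvSplitOn_eq NL r2 hN, pvCut_eq_find hN]
    by_cases hb : PySem.Chars.find r2 NL < 0
    · rw [if_pos hb]; exact ⟨[], by rw [hr3, if_pos hb]⟩
    · rw [if_neg hb]; exact ⟨_, by rw [hr3, if_neg hb]⟩
  obtain ⟨parts2, hparts2, hp2map⟩ : ∃ parts2, PySem.Str.split? s1 "\n#" = some parts2 ∧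
      parts2.map String.toList = PySem.Chars.splitOn r2 NL := by
    have hb := PySem.Str.split?_map s1 "\n#"
    rw [PySem.Chars.split?, if_neg (by simpa using hN), hs1] at hb
    cases hsp : PySem.Str.split? s1 "\n#" with
    | none => rw [hsp] at hb; exact absurd hb (by simp)
    | some parts2 => rw [hsp] at hb; exact ⟨parts2, rfl, by simpa using hb⟩
  obtain ⟨t0, ts, hts, ht0⟩ : ∃ t0 ts, parts2 = t0 :: ts ∧ t0.toList = r3 := by
    rw [hsplit2] at hp2map
    cases parts2 with
    | nil => exact absurd hp2map (by simp)
    | cons t0 ts =>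
      simp only [List.map_cons, List.cons.injEq] at hp2map
      exact ⟨t0, ts, rfl, hp2map.1⟩
  constructor
  · rw [hparts, Option.getD_some, hps]
    simp
  -- identify A's argument string: parts[1] is s1, head of its split is t0
  have hone : (1 : Int) = ((1 : Nat) : Int) := by norm_num
  have hA : ((PySem.List.pyGet? ((PySem.Str.split? c "## Verification Checklist").getD []) 1).getD "") = s1 := by
    rw [hparts, Option.getD_some, hps, hone, PySem.List.pyGet?_natCast]
    rfl
  rw [hA, hparts2, Option.getD_some, hts, List.headD_cons]
  -- A's value, expressed through the min-cut
  have hAval : PySem.Str.strip t0 = String.ofList (PySem.Chars.strip (pvMinCut rest)) := by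
    rw [PySem.Str.strip, ht0, ← pvStrip_seq_min rest]
    have hseq : pvSeqCut rest = r3 := rfl
    rw [hseq]
  clear_value r3 r2 rest i
  -- the header scan returns i
  have hscan1 : pvScan cl [HL] 0 = some i := by
    apply pvScanGo_some
    · simp only [List.any_cons, List.any_nil, Bool.or_false]
      exact List.isPrefixOf_iff_prefix.mpr hipre
    · intro j _ hj
      simp only [List.any_cons, List.any_nil, Bool.or_false]
      rw [← Bool.not_eq_true]
      intro hb
      exact himin j hj (List.isPrefixOf_iff_prefix.mp hb)
    · omega
    · have := PySem.Chars.find_le_length cl HL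
      omega
  have hstart_le : i + HL.length ≤ cl.length := by
    have := hipre.length_le
    simp only [List.length_drop] at this
    have h25 : HL.length = 25 := by rw [hHL]; decide
    omega
  have hrestlen : rest.length = cl.length - (i + HL.length) := by
    rw [hrest, List.length_drop]
  have hdrop : ∀ d : Nat, cl.drop (i + HL.length + d) = rest.drop d := by
    intro d
    rw [hrest, List.drop_drop]
  set fH := PySem.Chars.find rest HL with hfH
  set fN := PySem.Chars.find rest NL with hfN
  have hH1 : -1 ≤ fH := PySem.Chars.neg_one_le_find rest HL
  have hN1 : -1 ≤ fN := PySem.Chars.neg_one_le_find rest NL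
  have hHlen : fH ≤ rest.length := PySem.Chars.find_le_length rest HL
  have hNlen : fN ≤ rest.length := PySem.Chars.find_le_length rest NL
  have hnotH : ∀ d : Nat, (fH = -1 ∨ (d : Int) < fH) → ¬ HL <+: rest.drop d := by
    intro d hd hp
    rcases hd with hneg | hlt
    · have h1 : PySem.Chars.isIn HL rest = true :=
        (PySem.Chars.exists_prefix_drop_iff_isIn _ _).mp ⟨d, hp⟩
      have := (PySem.Chars.find_nonneg_iff rest HL).mpr ((PySem.Chars.isIn_iff_infix _ _).mp h1)
      omega
    · have h0 : 0 ≤ fH := by omega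
      obtain ⟨_, hmin⟩ := PySem.Chars.find_spec (s := rest) (sub := HL) h0
      rw [← hfH] at hmin
      exact hmin d (by omega) hp
  have hnotN : ∀ d : Nat, (fN = -1 ∨ (d : Int) < fN) → ¬ NL <+: rest.drop d := by
    intro d hd hp
    rcases hd with hneg | hlt
    · have h1 : PySem.Chars.isIn NL rest = true :=
        (PySem.Chars.exists_prefix_drop_iff_isIn _ _).mp ⟨d, hp⟩
      have := (PySem.Chars.find_nonneg_iff rest NL).mpr ((PySem.Chars.isIn_iff_infix _ _).mp h1)
      omega
    · have h0 : 0 ≤ fN := by omega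
      obtain ⟨_, hmin⟩ := PySem.Chars.find_spec (s := rest) (sub := NL) h0
      rw [← hfN] at hmin
      exact hmin d (by omega) hp
  by_cases hboth : fH = -1 ∧ fN = -1
  · -- neither stop pattern occurs: scan finds nothing, the slice is the whole tail
    have hscan2 : pvScan cl [HL, NL] (i + HL.length) = none := by
      apply pvScanGo_none
      intro j hj
      have hjd : cl.drop j = rest.drop (j - (i + HL.length)) := by
        rw [← hdrop (j - (i + HL.length))]; congr 1; omega
      simp only [List.any_cons, List.any_nil, Bool.or_false]
      rw [← Bool.not_eq_true, hjd]
      intro hb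
      rcases Bool.or_eq_true_iff.mp hb with hb | hb
      · exact hnotH _ (Or.inl hboth.1) (List.isPrefixOf_iff_prefix.mp hb)
      · exact hnotN _ (Or.inl hboth.2) (List.isPrefixOf_iff_prefix.mp hb)
    have hval : (PySem.Str.slice c (some ((i + HL.length : Nat) : Int)) none).toList = rest := by
      rw [PySem.Str.toList_slice, PySem.Chars.slice_eq_listSlice, ← hcl,
        PySem.List.slice_from_natCast]
      exact hrest.symm
    rw [pvSection.eq_def, ← hcl, ← hHL, ← hNL, hscan1]
    simp only []
    rw [hscan2]
    simp only []
    rw [hAval]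
    refine congrArg some ?_
    rw [PySem.Str.strip, hval, pvMinCut, ← hfH, ← hfN, if_pos hboth]
  · -- a stop pattern occurs: scan returns the start plus the min-cut position
    set m := pvStopPos rest with hm
    have hmdef : m = if fH = -1 then fN.toNat else if fN = -1 then fH.toNat else min fH.toNat fN.toNat := by
      rw [hm, pvStopPos, ← hHL, ← hNL, ← hfH, ← hfN]
    have hmle : m ≤ rest.length := by
      rw [hmdef]
      by_cases h1 : fH = -1
      · rw [if_pos h1]; omega
      · rw [if_neg h1]
        by_cases h2 : fN = -1
        · rw [if_pos h2]; omega
        · rw [if_neg h2]; omega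
    have hmatch : (([HL, NL] : List (List Char)).any fun p => p.isPrefixOf (cl.drop (i + HL.length + m))) = true := by
      rw [hdrop m]
      simp only [List.any_cons, List.any_nil, Bool.or_false, Bool.or_eq_true_iff]
      rw [hmdef]
      by_cases h1 : fH = -1
      · rw [if_pos h1]
        right
        have h0 : 0 ≤ fN := by
          rcases not_and_or.mp hboth with hc | hc
          · omega
          · omega
        have := PySem.Chars.find_spec (s := rest) (sub := NL) h0
        rw [← hfN] at this
        exact List.isPrefixOf_iff_prefix.mpr this.1
      · rw [if_neg h1]
        have h0 : 0 ≤ fH := by omega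
        have hHsp := PySem.Chars.find_spec (s := rest) (sub := HL) h0
        rw [← hfH] at hHsp
        by_cases h2 : fN = -1
        · rw [if_pos h2]
          exact Or.inl (List.isPrefixOf_iff_prefix.mpr hHsp.1)
        · rw [if_neg h2]
          have h0N : 0 ≤ fN := by omega
          have hNsp := PySem.Chars.find_spec (s := rest) (sub := NL) h0N
          rw [← hfN] at hNsp
          rcases Nat.le_total fH.toNat fN.toNat with hle | hle
          · rw [min_eq_left hle]
            exact Or.inl (List.isPrefixOf_iff_prefix.mpr hHsp.1)
          · rw [min_eq_right hle]
            exact Or.inr (List.isPrefixOf_iff_prefix.mpr hNsp.1)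
    have hscan2 : pvScan cl [HL, NL] (i + HL.length) = some (i + HL.length + m) := by
      apply pvScanGo_some cl [HL, NL] (i + HL.length + m) hmatch
      · intro j hj1 hj2
        have hjd : cl.drop j = rest.drop (j - (i + HL.length)) := by
          rw [← hdrop (j - (i + HL.length))]; congr 1; omega
        set d := j - (i + HL.length) with hd
        have hdm : d < m := by omega
        simp only [List.any_cons, List.any_nil, Bool.or_false]
        rw [← Bool.not_eq_true, hjd]
        intro hb
        have hdH : fH = -1 ∨ (d : Int) < fH := by
          rw [hmdef] at hdm
          by_cases h1 : fH = -1
          · exact Or.inl h1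
          · right
            rw [if_neg h1] at hdm
            by_cases h2 : fN = -1
            · rw [if_pos h2] at hdm; omega
            · rw [if_neg h2] at hdm
              have := Nat.lt_of_lt_of_le hdm (min_le_left _ _)
              omega
        have hdN : fN = -1 ∨ (d : Int) < fN := by
          rw [hmdef] at hdm
          by_cases h1 : fH = -1
          · rw [if_pos h1] at hdm; right; omega
          · rw [if_neg h1] at hdm
            by_cases h2 : fN = -1
            · exact Or.inl h2
            · right
              rw [if_neg h2] at hdm
              have := Nat.lt_of_lt_of_le hdm (min_le_right _ _)
              omega
        rcases Bool.or_eq_true_iff.mp hb with hb | hb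
        · exact hnotH d hdH (List.isPrefixOf_iff_prefix.mp hb)
        · exact hnotN d hdN (List.isPrefixOf_iff_prefix.mp hb)
      · omega
      · omega
    have hval : (PySem.Str.slice c (some ((i + HL.length : Nat) : Int)) (some ((i + HL.length + m : Nat) : Int))).toList = rest.take m := by
      rw [PySem.Str.toList_slice, PySem.Chars.slice_eq_listSlice, ← hcl,
        PySem.List.slice_natCast]
      rw [hrest]
      congr 1
      omega
    rw [pvSection.eq_def, ← hcl, ← hHL, ← hNL, hscan1]
    simp only []
    rw [hscan2]
    simp only []
    rw [hAval]
    refine congrArg some ?_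
    rw [PySem.Str.strip, hval, pvMinCut, ← hfH, ← hfN, if_neg hboth, ← hm]

theorem pvModify_insert {κ ν : Type} [BEq κ] [LawfulBEq κ] (d : PySem.Dict κ ν) (k : κ)
    (v d0 : ν) (f : ν → ν) : (d.insert k v).modify k d0 f = d.insert k (f v) := by
  rw [PySem.Dict.modify, PySem.Dict.getD_insert_self, PySem.Dict.insert_insert_self]

theorem pvInner_eq (d : PySem.Dict String (List String)) (lang : String)
    (v : List String) (files : List (String × String)) :
    files.foldl (fun extracted kv =>
        if PySem.Str.isIn "## Verification Checklist" kv.2 then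
          let parts := (PySem.Str.split? kv.2 "## Verification Checklist").getD []
          if 1 < parts.length then
            let sec := PySem.Str.strip (((PySem.Str.split? ((PySem.List.pyGet? parts 1).getD "") "\n#").getD []).headD "")
            extracted.modify lang [] (fun xs => xs ++ [sec])
          else extracted
        else extracted) (d.insert lang v)
      = d.insert lang (v ++ files.filterMap (fun kv => pvSection kv.2)) := by
  induction files generalizing v with
  | nil => simp
  | cons kv fs ih =>
    simp only [List.foldl_cons, List.filterMap_cons]
    by_cases hin : PySem.Str.isIn "## Verification Checklist" kv.2 = true
    · obtain ⟨hlen, hsec⟩ := pvSection_some kv.2 hin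
      rw [hsec]
      simp only [hin, if_true, if_pos hlen]
      rw [pvModify_insert, ih]
      simp
    · rw [pvSection_none kv.2 (by simpa using hin)]
      simp only [hin]
      exact ih v

-- ===== VERDICT (by name: the statement is the Claim_ definition above) =====
set_option maxHeartbeats 1000000 in
theorem extract_checklists_spec : Claim_equal_extract_checklists := by
  intro languages _ hpre
  have hcongr : ∀ (d : PySem.Dict String (List String)), ∀ lf ∈ languages,
      (lf.2.foldl (fun extracted kv =>
        if PySem.Str.isIn "## Verification Checklist" kv.2 = true then
          let parts := (PySem.Str.split? kv.2 "## Verification Checklist").getD []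
          if 1 < parts.length then
            let sec := PySem.Str.strip (((PySem.Str.split? ((PySem.List.pyGet? parts 1).getD "") "\n#").getD []).headD "")
            extracted.modify lf.1 [] (fun xs => xs ++ [sec])
          else extracted
        else extracted) (d.insert lf.1 []))
      = d.insert lf.1 (lf.2.filterMap (fun kv => pvSection kv.2)) := by
    intro d lf _
    have h := pvInner_eq d lf.1 [] lf.2
    simpa using h
  have h1 : extract_checklists languages =
      (languages.foldl (fun (d : PySem.Dict String (List String)) lf =>
        d.insert lf.1 (lf.2.filterMap (fun kv => pvSection kv.2))) PySem.Dict.empty).items :=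
    congrArg PySem.Dict.items (PySem.List.foldl_congr_mem languages _ _ PySem.Dict.empty hcongr)
  have h2 := PySem.Dict.items_foldl_insert_fresh languages Prod.fst
    (fun lf => lf.2.filterMap (fun kv => pvSection kv.2)) PySem.Dict.empty
    (fun a _ => PySem.Dict.contains_empty (κ := String) (ν := List String) a.1) hpre.1
  show extract_checklists languages = extract_checklists_alt languages
  rw [h1, h2]
  simp [extract_checklists_alt, PySem.Dict.empty]
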